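-- pv_equiv track=rewrite | github.com/koba925/alds | atcoder/ABC276/D.py | solve_mine
-- ===== SOURCE A (Python) =====
-- def factor23(n):
--     f2 = 0
--     while n % 2 == 0:
--         f2 += 1
--         n //= 2
--     f3 = 0
--     while n % 3 == 0:
--         f3 += 1
--         n //= 3
--     return f2, f3, n
--
-- def solve_mine(N, A):
--     factors = [factor23(a) for a in A]
--     if not all(rest == factors[0][2] for _, _, rest in factors):
--         return -1
--     sum2 = sum([f2 for f2, _, _ in factors])
--     sum3 = sum([f3 for _, f3, _ in factors])
--     min2 = min([f2 for f2, _, _ in factors])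
--     min3 = min([f3 for _, f3, _ in factors])
--     return sum2 + sum3 - min2 * N - min3 * N
-- ===== SOURCE B (Python) =====
-- def solve_mine(N, A):
--     def fac(n):
--         # summary of one element: (rest, sum2, sum3, min2, min3),
--         # pulling out shared factors of 6 first
--         k = 0
--         while n % 6 == 0:
--             k += 1
--             n //= 6
--         f2 = f3 = k
--         while n % 2 == 0:
--             f2 += 1
--             n //= 2
--         while n % 3 == 0:
--             f3 += 1
--             n //= 3
--         return (n, f2, f3, f2, f3)
--
--     def merge(x, y):
--         if x is None or y is None or x[0] != y[0]:
--             return None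
--         return (x[0], x[1] + y[1], x[2] + y[2], min(x[3], y[3]), min(x[4], y[4]))
--
--     def red(lst):
--         if len(lst) == 1:
--             return fac(lst[0])
--         mid = len(lst) // 2
--         return merge(red(lst[:mid]), red(lst[mid:]))
--
--     s = red(A)
--     if s is None:
--         return -1
--     return s[1] + s[2] - (s[3] + s[4]) * N
-- ===== Notes on version B (the rewrite author's own statement) =====
-- stated objective: alternative
-- what changed: Replaced the materialized triple list with its five separate comprehension passes by a divide-and-conquer reduction: each element is mapped to a mergeable summary (remainder, sums, minima) whose factoring pulls out shared 6-factors first, and summaries are combined pairwise by a recursive split of the list.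
-- outside the precondition, e.g. on solve_mine(0, []): A raises ValueError, B raises RecursionError
import Mathlib
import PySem

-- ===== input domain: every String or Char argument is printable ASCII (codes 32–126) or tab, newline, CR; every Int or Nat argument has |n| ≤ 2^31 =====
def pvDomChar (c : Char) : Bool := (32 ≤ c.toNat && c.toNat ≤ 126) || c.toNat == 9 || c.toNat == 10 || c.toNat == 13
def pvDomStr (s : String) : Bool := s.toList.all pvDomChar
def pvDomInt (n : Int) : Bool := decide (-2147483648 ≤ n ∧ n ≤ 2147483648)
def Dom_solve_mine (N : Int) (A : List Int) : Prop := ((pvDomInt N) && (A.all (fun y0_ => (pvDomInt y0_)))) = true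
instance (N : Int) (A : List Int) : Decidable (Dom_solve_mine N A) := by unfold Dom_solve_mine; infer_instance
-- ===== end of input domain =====

-- B replaces A's staged comprehension passes by a divide-and-conquer reduction of per-element
-- mergeable summaries whose factoring pulls out shared 6-factors first; objective: alternative.

-- ===== PORT A =====
-- the Python while loops are ported with fuel n.natAbs + 1, which exceeds the number of
-- iterations whenever n ≠ 0 (n = 0 makes the Python loop diverge and is excluded by Pre_).
def divCount (p : Int) : Nat → Int → Int → Int × Int
  | 0, n, acc => (acc, n)
  | fuel + 1, n, acc =>
      if PySem.Int.mod n p = 0 then divCount p fuel (PySem.Int.floordiv n p) (acc + 1)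
      else (acc, n)

def factor23 (n : Int) : Int × Int × Int :=
  let r2 := divCount 2 (n.natAbs + 1) n 0
  let r3 := divCount 3 (r2.2.natAbs + 1) r2.2 0
  (r2.1, r3.1, r3.2)

def solve_mine (N : Int) (A : List Int) : Int :=
  let factors := A.map factor23
  let rest0 := (factors.headD (0, 0, 0)).2.2
  if factors.all (fun t => t.2.2 == rest0) then
    let sum2 := (factors.map (fun t => t.1)).sum
    let sum3 := (factors.map (fun t => t.2.1)).sum
    -- min([]) raises ValueError in Python (min? = none); the getD 0 is unreachable under Pre_
    let min2 := (PySem.List.min? (factors.map (fun t => t.1)) (fun x => x)).getD 0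
    let min3 := (PySem.List.min? (factors.map (fun t => t.2.1)) (fun x => x)).getD 0
    sum2 + sum3 - min2 * N - min3 * N
  else -1

-- ===== PORT B =====
-- summary of one element: (rest, sum2, sum3, min2, min3)
structure PVSum where
  rest : Int
  s2 : Int
  s3 : Int
  m2 : Int
  m3 : Int
deriving DecidableEq, Repr

-- B's fac: pull out shared 6-factors first, then leftover 2s, then leftover 3s
def fac (n : Int) : PVSum :=
  let r6 := divCount 6 (n.natAbs + 1) n 0
  let r2 := divCount 2 (r6.2.natAbs + 1) r6.2 0
  let r3 := divCount 3 (r2.2.natAbs + 1) r2.2 0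
  ⟨r3.2, r6.1 + r2.1, r6.1 + r3.1, r6.1 + r2.1, r6.1 + r3.1⟩

def pvMerge : Option PVSum → Option PVSum → Option PVSum
  | some x, some y =>
      if x.rest ≠ y.rest then none
      else some ⟨x.rest, x.s2 + y.s2, x.s3 + y.s3, min x.m2 y.m2, min x.m3 y.m3⟩
  | _, _ => none

-- Python's red diverges on []; the none here is unreachable under Pre_
def pvRed : List Int → Option PVSum
  | [] => none
  | [a] => some (fac a)
  | a :: b :: rest =>
      pvMerge (pvRed ((a :: b :: rest).take ((a :: b :: rest).length / 2)))
              (pvRed ((a :: b :: rest).drop ((a :: b :: rest).length / 2)))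
termination_by l => l.length
decreasing_by
  · simp [List.length_take]; omega
  · simp [List.length_drop]; omega

def solve_mine_alt (N : Int) (A : List Int) : Int :=
  match pvRed A with
  | none => -1
  | some s => s.s2 + s.s3 - (s.m2 + s.m3) * N

-- ===== PRECONDITION & SPEC =====
-- Pre_ excludes A = [] (Python A raises ValueError at min([]); Python B hits RecursionError)
-- and 0 ∈ A (the factoring while-loops of both Pythons never terminate on 0).
def Pre_solve_mine (N : Int) (A : List Int) : Prop := A ≠ [] ∧ ¬ (0 ∈ A)
instance (N : Int) (A : List Int) : Decidable (Pre_solve_mine N A) := by unfold Pre_solve_mine; infer_instance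
def pvWitness_solve_mine : Int × List Int := (3, [4, 6, 12])

def Spec_solve_mine (N : Int) (A : List Int) (out : Int) : Prop := out = solve_mine_alt N A
instance (N : Int) (A : List Int) (out : Int) : Decidable (Spec_solve_mine N A out) := by unfold Spec_solve_mine; infer_instance

-- ===== CLAIM (what is proved, stated in full; the proofs are below) =====
def Claim_equal_solve_mine : Prop := ∀ (N : Int) (A : List Int), Dom_solve_mine N A → Pre_solve_mine N A → Spec_solve_mine N A (solve_mine N A)

-- ===== LEMMAS AND PROOFS =====

-- A's per-element result repackaged as a summary
def fSum (n : Int) : PVSum :=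
  ⟨(factor23 n).2.2, (factor23 n).1, (factor23 n).2.1, (factor23 n).1, (factor23 n).2.1⟩

-- the linear ("left-to-right") reduction of summaries
def pvL : List Int → Option PVSum
  | [] => none
  | a :: t => t.foldl (fun s b => pvMerge s (some (fac b))) (some (fac a))

lemma divCount_spec (p : Int) (hp : 2 ≤ p) :
    ∀ (fuel : Nat) (n acc : Int), n ≠ 0 → n.natAbs ≤ fuel →
      ∃ (k : Nat) (r : Int), divCount p (fuel + 1) n acc = (acc + (k : Int), r) ∧
        n = p ^ k * r ∧ ¬ p ∣ r ∧ r ≠ 0 := by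
  intro fuel
  induction fuel with
  | zero =>
      intro n acc hn hle
      exact absurd (Int.natAbs_eq_zero.mp (Nat.le_zero.mp hle)) hn
  | succ fuel ih =>
      intro n acc hn hle
      by_cases hd : PySem.Int.mod n p = 0
      · obtain ⟨m, hm⟩ := (PySem.Int.mod_eq_zero_iff_dvd n p).mp hd
        have hfloor : PySem.Int.floordiv n p = m := by
          rw [PySem.Int.floordiv_eq_ediv_of_pos (by omega), hm,
            Int.mul_ediv_cancel_left _ (by omega)]
        have hm0 : m ≠ 0 := by rintro rfl; simp at hm; omega
        have habs : m.natAbs ≤ fuel := by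
          have h1 : n.natAbs = p.natAbs * m.natAbs := by rw [hm, Int.natAbs_mul]
          have h2 : 2 ≤ p.natAbs := by omega
          have h3 : 1 ≤ m.natAbs := by omega
          have h4 : 2 * m.natAbs ≤ p.natAbs * m.natAbs := Nat.mul_le_mul_right _ h2
          omega
        obtain ⟨k, r, hrec, hfact, hnd, hr0⟩ := ih m (acc + 1) hm0 habs
        refine ⟨k + 1, r, ?_, ?_, hnd, hr0⟩
        · rw [divCount, if_pos hd, hfloor, hrec]
          simp only [Prod.mk.injEq]
          exact ⟨by push_cast; ring, trivial⟩
        · rw [hm, hfact]; ring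
      · refine ⟨0, n, ?_, by simp, ?_, hn⟩
        · simp [divCount, hd]
        · intro hdvd
          exact hd ((PySem.Int.mod_eq_zero_iff_dvd n p).mpr hdvd)

lemma padic_unique {p : Int} (hp : Prime p) :
    ∀ (k1 : Nat) {k2 : Nat} {r1 r2 : Int}, p ^ k1 * r1 = p ^ k2 * r2 → ¬ p ∣ r1 → ¬ p ∣ r2 →
      k1 = k2 ∧ r1 = r2 := by
  intro k1
  induction k1 with
  | zero =>
      intro k2 r1 r2 h h1 h2
      cases k2 with
      | zero => simpa using h
      | succ j =>
          exfalso
          apply h1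
          refine ⟨p ^ j * r2, ?_⟩
          rw [pow_zero, one_mul] at h
          rw [h, pow_succ']; ring
  | succ i ih =>
      intro k2 r1 r2 h h1 h2
      cases k2 with
      | zero =>
          exfalso
          apply h2
          refine ⟨p ^ i * r1, ?_⟩
          rw [pow_zero, one_mul] at h
          rw [← h, pow_succ']; ring
      | succ j =>
          have hc : p ^ i * r1 = p ^ j * r2 := by
            have h' : p * (p ^ i * r1) = p * (p ^ j * r2) := by
              rw [show p * (p ^ i * r1) = p ^ (i + 1) * r1 by ring,
                show p * (p ^ j * r2) = p ^ (j + 1) * r2 by ring]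
              exact h
            exact mul_left_cancel₀ hp.ne_zero h'
          obtain ⟨hk, hr⟩ := ih hc h1 h2
          exact ⟨by omega, hr⟩

lemma fac_eq (n : Int) (hn : n ≠ 0) : fac n = fSum n := by
  obtain ⟨k, m1, h6, hn6, hd6, hm1⟩ := divCount_spec 6 (by norm_num) n.natAbs n 0 hn (le_refl _)
  obtain ⟨j, m2, h2, hm12, hd2, hm2⟩ := divCount_spec 2 (by norm_num) m1.natAbs m1 0 hm1 (le_refl _)
  obtain ⟨i, r, h3, hm23, hd3, hr⟩ := divCount_spec 3 (by norm_num) m2.natAbs m2 0 hm2 (le_refl _)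
  obtain ⟨a, ma, hA2, hna, hda, hma⟩ := divCount_spec 2 (by norm_num) n.natAbs n 0 hn (le_refl _)
  obtain ⟨b, rA, hA3, hab, hdb, hrA⟩ := divCount_spec 3 (by norm_num) ma.natAbs ma 0 hma (le_refl _)
  have key2 : n = 2 ^ (k + j) * (3 ^ (k + i) * r) := by
    rw [hn6, hm12, hm23, show (6:Int) ^ k = 2 ^ k * 3 ^ k by rw [← mul_pow]; norm_num]
    ring
  have hnd2 : ¬ (2:Int) ∣ (3 ^ (k + i) * r) := by
    intro h
    rcases (Int.prime_two.dvd_mul).mp h with h | h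
    · exact absurd (Int.prime_two.dvd_of_dvd_pow h) (by norm_num)
    · exact hd2 (by rw [hm23]; exact Dvd.dvd.mul_left h _)
  have e1 : (2:Int) ^ a * ma = 2 ^ (k + j) * (3 ^ (k + i) * r) := by rw [← hna]; exact key2
  obtain ⟨hae, hme⟩ := padic_unique Int.prime_two a e1 hda hnd2
  have e2 : (3:Int) ^ b * rA = 3 ^ (k + i) * r := by rw [← hab, hme]
  obtain ⟨hbe, hre⟩ := padic_unique Int.prime_three b e2 hdb hd3
  simp only [fac, fSum, factor23, h6, h2, h3, hA2, hA3]
  subst hre hae hbe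
  simp only [PVSum.mk.injEq, and_true, true_and]
  push_cast
  omega

lemma merge_none_right (x : Option PVSum) : pvMerge x none = none := by
  cases x <;> rfl

lemma merge_assoc (x y z : Option PVSum) : pvMerge (pvMerge x y) z = pvMerge x (pvMerge y z) := by
  rcases x with _ | x
  · rfl
  rcases y with _ | y
  · rfl
  rcases z with _ | z
  · exact (merge_none_right _).trans (merge_none_right _).symm
  by_cases h1 : x.rest = y.rest
  · by_cases h2 : y.rest = z.rest
    · have h3 : x.rest = z.rest := h1.trans h2
      simp [pvMerge, h1, h2, h3, min_assoc, add_assoc]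
    · have h3 : x.rest ≠ z.rest := h1 ▸ h2
      simp [pvMerge, h1, h2, h3]
  · simp only [pvMerge]
    rw [if_pos h1]
    split_ifs <;> simp [pvMerge, h1]

lemma foldl_merge_none (t : List Int) :
    t.foldl (fun s b => pvMerge s (some (fac b))) none = none := by
  induction t with
  | nil => rfl
  | cons b t ih => simpa [pvMerge] using ih

lemma foldl_merge_pull (t : List Int) :
    ∀ (s x : Option PVSum),
      t.foldl (fun s b => pvMerge s (some (fac b))) (pvMerge s x) =
        pvMerge s (t.foldl (fun s b => pvMerge s (some (fac b))) x) := by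
  induction t with
  | nil => intro s x; rfl
  | cons c t ih => intro s x; simpa [List.foldl, merge_assoc] using ih (s) (pvMerge x (some (fac c)))

lemma pvL_append (l1 l2 : List Int) (h1 : l1 ≠ []) (h2 : l2 ≠ []) :
    pvL (l1 ++ l2) = pvMerge (pvL l1) (pvL l2) := by
  obtain ⟨a, t1, rfl⟩ := List.exists_cons_of_ne_nil h1
  obtain ⟨b, t2, rfl⟩ := List.exists_cons_of_ne_nil h2
  simp only [pvL, List.cons_append, List.foldl_append, List.foldl_cons]
  rw [foldl_merge_pull]

lemma red_eq_L : ∀ (l : List Int), l ≠ [] → pvRed l = pvL l := by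
  intro l
  induction l using pvRed.induct with
  | case1 => intro h; exact absurd rfl h
  | case2 a => intro _; simp [pvRed, pvL]
  | case3 a b rest ih1 ih2 =>
      intro _
      have htk : (a :: b :: rest).take ((a :: b :: rest).length / 2) ≠ [] := by
        simp [List.take_eq_nil_iff]
      have hdp : (a :: b :: rest).drop ((a :: b :: rest).length / 2) ≠ [] := by
        simp only [ne_eq, List.drop_eq_nil_iff, List.length_cons]
        omega
      rw [pvRed, ih1 htk, ih2 hdp, ← pvL_append _ _ htk hdp, List.take_append_drop]

lemma foldl_merge_some (t : List Int) :
    ∀ (s : PVSum),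
      t.foldl (fun s b => pvMerge s (some (fac b))) (some s) =
        if t.all (fun x => (fac x).rest == s.rest) then
          some ⟨s.rest, s.s2 + (t.map (fun x => (fac x).s2)).sum,
                s.s3 + (t.map (fun x => (fac x).s3)).sum,
                (t.map (fun x => (fac x).m2)).foldl min s.m2,
                (t.map (fun x => (fac x).m3)).foldl min s.m3⟩
        else none := by
  induction t with
  | nil => intro s; simp
  | cons b t ih =>
      intro s
      by_cases hb : (fac b).rest = s.rest
      · have hmerge : pvMerge (some s) (some (fac b)) =
            some ⟨s.rest, s.s2 + (fac b).s2, s.s3 + (fac b).s3,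
                  min s.m2 (fac b).m2, min s.m3 (fac b).m3⟩ := by
          simp [pvMerge, hb]
        rw [List.foldl_cons, hmerge, ih]
        simp only [List.all_cons, List.map_cons, List.sum_cons, List.foldl_cons, hb,
          beq_self_eq_true, Bool.true_and]
        split_ifs with h
        · simp only [Option.some.injEq, PVSum.mk.injEq, true_and, and_true]
          exact ⟨by ring, by ring⟩
        · rfl
      · rw [List.foldl_cons]
        have hbeq : ((fac b).rest == s.rest) = false := by simpa using hb
        have hmerge : pvMerge (some s) (some (fac b)) = none := by
          have hne : s.rest ≠ (fac b).rest := fun h => hb h.symm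
          simp [pvMerge, hne]
        rw [hmerge, foldl_merge_none]
        simp [hbeq]

lemma all_congr_mem {α : Type} {p q : α → Bool} :
    ∀ {l : List α}, (∀ x ∈ l, p x = q x) → l.all p = l.all q := by
  intro l h
  induction l with
  | nil => rfl
  | cons a t ih => simp_all

theorem solve_mine_spec : Claim_equal_solve_mine := by
  intro N A _ hpre
  obtain ⟨hne, hz⟩ := hpre
  obtain ⟨a, t, rfl⟩ := List.exists_cons_of_ne_nil hne
  have ha0 : a ≠ 0 := by intro h; exact hz (by simp [h])
  have ht0 : ∀ x ∈ t, x ≠ 0 := by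
    intro x hx h
    subst h
    exact hz (List.mem_cons_of_mem _ hx)
  unfold Spec_solve_mine solve_mine solve_mine_alt
  rw [red_eq_L _ hne]
  have hL : pvL (a :: t) = t.foldl (fun s b => pvMerge s (some (fac b))) (some (fac a)) := rfl
  rw [hL, fac_eq a ha0, foldl_merge_some]
  have hc : t.all (fun x => (fac x).rest == (fSum a).rest) =
      t.all (fun x => (factor23 x).2.2 == (factor23 a).2.2) := by
    apply all_congr_mem
    intro x hx
    rw [fac_eq x (ht0 x hx)]
    rfl
  have hs2 : t.map (fun x => (fac x).s2) = t.map (fun x => (factor23 x).1) := by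
    apply List.map_congr_left
    intro x hx
    rw [fac_eq x (ht0 x hx)]
    rfl
  have hs3 : t.map (fun x => (fac x).s3) = t.map (fun x => (factor23 x).2.1) := by
    apply List.map_congr_left
    intro x hx
    rw [fac_eq x (ht0 x hx)]
    rfl
  have hm2 : t.map (fun x => (fac x).m2) = t.map (fun x => (factor23 x).1) := by
    apply List.map_congr_left
    intro x hx
    rw [fac_eq x (ht0 x hx)]
    rfl
  have hm3 : t.map (fun x => (fac x).m3) = t.map (fun x => (factor23 x).2.1) := by
    apply List.map_congr_left
    intro x hx
    rw [fac_eq x (ht0 x hx)]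
    rfl
  rw [hc, hs2, hs3, hm2, hm3]
  by_cases h : t.all (fun x => (factor23 x).2.2 == (factor23 a).2.2)
  · simp only [List.map_cons, List.headD_cons, List.all_cons, beq_self_eq_true, Bool.true_and,
      List.all_map, Function.comp_def, h, if_true, List.map_map, List.sum_cons,
      PySem.List.min?_id_cons, Option.getD_some, List.foldl_cons]
    simp only [fSum]
    ring
  · simp only [List.map_cons, List.headD_cons, List.all_cons, beq_self_eq_true, Bool.true_and,
      List.all_map, Function.comp_def, h, if_false]
    simp
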